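-- pv_equiv track=rewrite | github.com/daniel-reich/ubiquitous-fiesta | tRHaoWNaHBJCYD5Nx_19.py | same_letter_pattern
-- ===== SOURCE A (Python) =====
-- def same_letter_pattern(txt1, txt2):
--   if len(set(txt1))!= len(set(txt2)): return False
--   for i in range(len(set(txt1))):
--     for j in txt1:
--       if j.isalpha():
--         txt1 = txt1.replace(j, str(i))
--         break
--   for i in range(len(set(txt2))):
--     for j in txt2:
--       if j.isalpha():
--         txt2 = txt2.replace(j, str(i))
--         break
--   return txt1 == txt2
-- ===== SOURCE B (Python) =====
-- def _normalize(t):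
--     letters = [c for c in dict.fromkeys(t) if c.isalpha()]
--     return t.translate({ord(c): str(i) for i, c in enumerate(letters)})
--
-- def same_letter_pattern(txt1, txt2):
--     if len(set(txt1)) != len(set(txt2)):
--         return False
--     return _normalize(txt1) == _normalize(txt2)
-- ===== Notes on version B (the rewrite author's own statement) =====
-- stated objective: faster
-- what changed: Replaces A's quadratic normalization (one full-string str.replace pass per distinct character, re-scanning the string each round) with a first-appearance rank table built via dict.fromkeys and a single str.translate pass that rebuilds each normalized string once.
import Mathlib
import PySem

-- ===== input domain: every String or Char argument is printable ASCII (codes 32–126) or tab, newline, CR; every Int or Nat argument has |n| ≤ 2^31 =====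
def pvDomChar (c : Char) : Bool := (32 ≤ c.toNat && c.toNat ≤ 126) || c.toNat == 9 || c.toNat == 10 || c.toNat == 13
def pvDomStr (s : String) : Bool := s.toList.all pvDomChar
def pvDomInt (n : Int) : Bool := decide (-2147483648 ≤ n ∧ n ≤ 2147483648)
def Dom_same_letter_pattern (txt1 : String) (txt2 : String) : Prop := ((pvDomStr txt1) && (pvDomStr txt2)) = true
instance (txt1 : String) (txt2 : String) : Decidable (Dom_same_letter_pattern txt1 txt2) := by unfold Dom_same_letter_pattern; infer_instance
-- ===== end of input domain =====

-- B replaces A's quadratic normalization (one str.replace pass per distinct character) with a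
-- first-appearance table (dict.fromkeys) and one str.translate pass per string (objective: faster).

-- ===== PORT A =====
-- 'for j in txt: if j.isalpha(): txt = txt.replace(j, str(i)); break' — find the first
-- alphabetic character of the current string and replace all its occurrences with str(i).
def pvStepA (s : List Char) (i : Int) : List Char :=
  match s.find? (fun j => PySem.Chars.isalpha j) with
  | some j => PySem.Chars.replace s [j] (PySem.Int.toChars i)
  | none => s

def same_letter_pattern (txt1 : String) (txt2 : String) : Bool :=
  if (PySem.Set.ofList txt1.toList).length ≠ (PySem.Set.ofList txt2.toList).length then false
  else
    let t1 := (PySem.List.pyRange 0 ((PySem.Set.ofList txt1.toList).length : Int) 1).foldl pvStepA txt1.toList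
    let t2 := (PySem.List.pyRange 0 ((PySem.Set.ofList txt2.toList).length : Int) 1).foldl pvStepA txt2.toList
    decide (t1 = t2)

-- ===== PORT B =====
-- table = {ord(c): str(i) for i, c in enumerate(letters)}
def pvTable (letters : List Char) : PySem.Dict Int (List Char) :=
  (PySem.List.enumerate letters 0).foldl
    (fun d p => d.insert ((p.2.toNat : Int)) (PySem.Int.toChars p.1)) (PySem.Dict.mk [])

-- letters = [c for c in dict.fromkeys(t) if c.isalpha()]; then t.translate(table), ported by
-- hand (exact for an int-keyed, str-valued table): each character c becomes table[ord(c)]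
-- when ord(c) is a key and is kept unchanged otherwise.
def pvNormB (s : List Char) : List Char :=
  let letters := (PySem.List.dedup s).filter (fun c => PySem.Chars.isalpha c)
  s.flatMap (fun c => match (pvTable letters).get? ((c.toNat : Int)) with
    | some r => r
    | none => [c])

def same_letter_pattern_alt (txt1 : String) (txt2 : String) : Bool :=
  if (PySem.Set.ofList txt1.toList).length ≠ (PySem.Set.ofList txt2.toList).length then false
  else decide (pvNormB txt1.toList = pvNormB txt2.toList)

-- ===== PRECONDITION & SPEC =====
def Spec_same_letter_pattern (txt1 : String) (txt2 : String) (out : Bool) : Prop := out = same_letter_pattern_alt txt1 txt2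
instance (txt1 : String) (txt2 : String) (out : Bool) : Decidable (Spec_same_letter_pattern txt1 txt2 out) := by unfold Spec_same_letter_pattern; infer_instance

-- ===== CLAIM (what is proved, stated in full; the proofs are below) =====
def Claim_equal_same_letter_pattern : Prop := ∀ (txt1 : String) (txt2 : String), Dom_same_letter_pattern txt1 txt2 → Spec_same_letter_pattern txt1 txt2 (same_letter_pattern txt1 txt2)

-- ===== LEMMAS AND PROOFS =====

-- the distinct alphabetic characters of s, in order of first appearance
def pvLetters (s : List Char) : List Char :=
  PySem.List.dedup (s.filter (fun c => PySem.Chars.isalpha c))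

-- substitute the k-th letter of L by str(a + k), keep every other character
def pvSub (a : Int) (L : List Char) (s : List Char) : List Char :=
  s.flatMap (fun c => match PySem.List.index? L c with
    | some j => PySem.Int.toChars (a + (j : Int))
    | none => [c])

lemma pv_flatMap_congr {α β : Type} (s : List α) (f g : α → List β)
    (h : ∀ c ∈ s, f c = g c) : s.flatMap f = s.flatMap g := by
  induction s with
  | nil => rfl
  | cons c t ih =>
    simp only [List.flatMap_cons, h c (by simp), ih (fun d hd => h d (by simp [hd]))]

lemma pv_digitChar_not_alpha (d : Nat) (hd : d < 10) :
    PySem.Chars.isalpha (Nat.digitChar d) = false := by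
  interval_cases d <;> decide

lemma pv_toDigitsCore_not_alpha :
    ∀ (fuel n : Nat) (ds : List Char), (∀ c ∈ ds, PySem.Chars.isalpha c = false) →
    ∀ c ∈ Nat.toDigitsCore 10 fuel n ds, PySem.Chars.isalpha c = false := by
  intro fuel
  induction fuel with
  | zero =>
    intro n ds h c hc
    rw [Nat.toDigitsCore] at hc
    exact h c hc
  | succ fuel ih =>
    intro n ds h c hc
    rw [Nat.toDigitsCore] at hc
    have hds : ∀ c ∈ (n % 10).digitChar :: ds, PySem.Chars.isalpha c = false := by
      intro c hc
      rcases List.mem_cons.mp hc with h1 | h2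
      · rw [h1]; exact pv_digitChar_not_alpha _ (Nat.mod_lt _ (by norm_num))
      · exact h c h2
    by_cases h0 : n / 10 = 0
    · rw [if_pos h0] at hc
      exact hds c hc
    · rw [if_neg h0] at hc
      exact ih _ _ hds c hc

lemma pv_toChars_not_alpha (a : Int) (ha : 0 ≤ a) :
    ∀ c ∈ PySem.Int.toChars a, PySem.Chars.isalpha c = false := by
  intro c hc
  simp only [PySem.Int.toChars] at hc
  rw [if_neg (by omega)] at hc
  exact pv_toDigitsCore_not_alpha (a.toNat + 1) a.toNat [] (by simp) c hc

lemma pv_replace_single (j : Char) (new : List Char) (s : List Char) :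
    PySem.Chars.replace s [j] new = s.flatMap (fun c => if c = j then new else [c]) := by
  have go : ∀ (l : List Char) (fuel : Nat) (acc : List Char), l.length ≤ fuel →
      PySem.Chars.replace.go [j] new fuel l acc
        = acc.reverse ++ l.flatMap (fun c => if c = j then new else [c]) := by
    intro l
    induction l with
    | nil =>
      intro fuel acc _
      cases fuel <;> simp [PySem.Chars.replace.go]
    | cons c t ih =>
      intro fuel acc hf
      cases fuel with
      | zero => simp at hf
      | succ fuel =>
        by_cases hc : c = j
        · subst hc
          rw [PySem.Chars.replace.go]
          simp only [List.isPrefixOf, beq_self_eq_true, Bool.true_and, if_pos,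
            List.length_cons, List.length_nil, List.drop_succ_cons, List.drop_zero]
          rw [ih fuel (new.reverse ++ acc) (by simpa using hf)]
          simp
        · have hjc : (j == c) = false := beq_eq_false_iff_ne.mpr (Ne.symm hc)
          rw [PySem.Chars.replace.go]
          simp only [List.isPrefixOf, hjc, Bool.false_and, Bool.false_eq_true, if_false]
          rw [ih fuel (c :: acc) (by simpa using hf)]
          simp [hc]
  rw [PySem.Chars.replace]
  simp only [List.isEmpty_cons, Bool.false_eq_true, if_false]
  rw [go s s.length [] le_rfl]
  simp

lemma pv_letters_nodup (s : List Char) : (pvLetters s).Nodup := by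
  rw [pvLetters]
  exact PySem.List.nodup_dedup _

lemma pv_mem_letters_alpha {c : Char} {s : List Char} (h : c ∈ pvLetters s) :
    PySem.Chars.isalpha c = true := by
  rw [pvLetters] at h
  rw [PySem.List.mem_dedup] at h
  exact (List.mem_filter.mp h).2

lemma pv_head_dedup {α : Type} [BEq α] [LawfulBEq α] (xs : List α) :
    (PySem.List.dedup xs).head? = xs.head? := by
  cases xs with
  | nil => rfl
  | cons x t => simp [PySem.List.dedup_eq_ofList, PySem.Set.ofList_cons]

lemma pv_find_letters (s : List Char) :
    s.find? (fun j => PySem.Chars.isalpha j) = (pvLetters s).head? := by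
  rw [pvLetters, pv_head_dedup]
  exact (List.head?_filter).symm

lemma pv_ofList_filter (p : Char → Bool) :
    ∀ (xs : List Char), PySem.Set.ofList (xs.filter p) = (PySem.Set.ofList xs).filter p := by
  intro xs
  induction xs with
  | nil => rfl
  | cons x t ih =>
    by_cases hx : p x = true
    · rw [List.filter_cons_of_pos hx, PySem.Set.ofList_cons, PySem.Set.ofList_cons, ih,
        List.filter_cons_of_pos hx, PySem.Set.discard, PySem.Set.discard]
      exact congrArg (x :: ·) (List.filter_comm _ _ _)
    · rw [List.filter_cons_of_neg hx, PySem.Set.ofList_cons, ih,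
        List.filter_cons_of_neg hx, PySem.Set.discard]
      conv_rhs => rw [List.filter_comm]
      symm
      apply List.filter_eq_self.mpr
      intro y hy
      have hyp : p y = true := List.of_mem_filter hy
      have hne : y ≠ x := by
        intro he; rw [he] at hyp; exact hx hyp
      simp [hne]

lemma pv_letters_le_set (s : List Char) :
    (pvLetters s).length ≤ (PySem.Set.ofList s).length := by
  rw [pvLetters, PySem.List.dedup_eq_ofList, pv_ofList_filter]
  exact List.length_filter_le _ _

lemma pv_filter_flatMap_step (l0 : Char) (r : List Char)
    (hr : ∀ c ∈ r, PySem.Chars.isalpha c = false) :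
    ∀ s : List Char,
    (s.flatMap (fun c => if c = l0 then r else [c])).filter (fun c => PySem.Chars.isalpha c)
      = ((s.filter (fun c => PySem.Chars.isalpha c)).filter (fun y => !(y == l0))) := by
  intro s
  induction s with
  | nil => rfl
  | cons c t ih =>
    have h1 : List.filter (fun c => PySem.Chars.isalpha c) r = [] :=
      List.filter_eq_nil_iff.mpr (by intro a ha; simp [hr a ha])
    by_cases hc : c = l0
    · subst hc
      by_cases ha : PySem.Chars.isalpha c = true
      · simp [List.flatMap_cons, List.filter_append, h1, ih, ha]
      · simp [List.flatMap_cons, List.filter_append, h1, ih, ha]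
    · by_cases ha : PySem.Chars.isalpha c = true
      · simp [List.flatMap_cons, hc, ih, ha]
      · simp [List.flatMap_cons, hc, ih, ha]

lemma pv_letters_step (s : List Char) (l0 : Char) (L' : List Char) (r : List Char)
    (hr : ∀ c ∈ r, PySem.Chars.isalpha c = false)
    (hL : pvLetters s = l0 :: L') :
    pvLetters (s.flatMap (fun c => if c = l0 then r else [c])) = L' := by
  have hnd : (l0 :: L').Nodup := hL ▸ pv_letters_nodup s
  rw [pvLetters, PySem.List.dedup_eq_ofList, pv_filter_flatMap_step l0 r hr, pv_ofList_filter]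
  have hofL : PySem.Set.ofList (s.filter (fun c => PySem.Chars.isalpha c)) = l0 :: L' := by
    rw [← PySem.List.dedup_eq_ofList, ← pvLetters, hL]
  rw [hofL, List.filter_cons_of_neg (by simp)]
  apply List.filter_eq_self.mpr
  intro y hy
  have hne : y ≠ l0 := by
    intro he; subst he; exact (List.nodup_cons.mp hnd).1 hy
  simp [hne]

lemma pv_sub_nil (a : Int) (s : List Char) : pvSub a [] s = s := by
  rw [pvSub]
  have hnone : ∀ c : Char, PySem.List.index? ([] : List Char) c = none := by
    intro c; exact (PySem.List.index?_eq_none_iff _ _).mpr (by simp)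
  calc s.flatMap (fun c => match PySem.List.index? ([] : List Char) c with
        | some j => PySem.Int.toChars (a + (j : Int))
        | none => [c])
      = s.flatMap (fun c => [c]) := pv_flatMap_congr _ _ _ (by intro c _; rw [hnone c])
    _ = s := List.flatMap_singleton' s

lemma pv_sub_step (a : Int) (l0 : Char) (L' s : List Char)
    (hnotmem : l0 ∉ L')
    (halpha : ∀ c ∈ L', PySem.Chars.isalpha c = true)
    (hr : ∀ c ∈ PySem.Int.toChars a, PySem.Chars.isalpha c = false) :
    pvSub (a+1) L' (s.flatMap (fun c => if c = l0 then PySem.Int.toChars a else [c]))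
      = pvSub a (l0 :: L') s := by
  have hnL : ∀ d ∈ PySem.Int.toChars a, PySem.List.index? L' d = none := by
    intro d hd
    apply (PySem.List.index?_eq_none_iff _ _).mpr
    intro hm
    have h1 := halpha d hm
    rw [hr d hd] at h1
    exact Bool.false_ne_true h1
  rw [pvSub, pvSub, List.flatMap_assoc]
  apply pv_flatMap_congr
  intro c _
  by_cases hc : c = l0
  · subst hc
    rw [if_pos rfl, PySem.List.index?_cons_self]
    have hid : (PySem.Int.toChars a).flatMap (fun d => match PySem.List.index? L' d with
        | some j => PySem.Int.toChars (a + 1 + (j : Int))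
        | none => [d]) = (PySem.Int.toChars a).flatMap (fun d => [d]) :=
      pv_flatMap_congr _ _ _ (by intro d hd; rw [hnL d hd])
    rw [hid, List.flatMap_singleton']
    norm_num
  · rw [if_neg hc, List.flatMap_cons, List.flatMap_nil, List.append_nil,
      PySem.List.index?_cons_of_ne _ (Ne.symm hc)]
    cases hx : PySem.List.index? L' c with
    | none => simp
    | some j =>
      simp only [Option.map_some]
      congr 1
      push_cast
      ring

lemma pv_foldA (n : Nat) : ∀ (a : Int) (s : List Char), 0 ≤ a →
    (pvLetters s).length ≤ n →
    (PySem.List.pyRange a (a + (n : Int)) 1).foldl pvStepA s = pvSub a (pvLetters s) s := by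
  induction n with
  | zero =>
    intro a s _ hlen
    have hL : pvLetters s = [] := List.eq_nil_of_length_eq_zero (Nat.le_zero.mp hlen)
    rw [hL, PySem.List.pyRange_one_eq_nil (by omega), List.foldl_nil, pv_sub_nil]
  | succ n ih =>
    intro a s ha hlen
    have hcast : a + ((n + 1 : Nat) : Int) = (a + 1) + (n : Int) := by push_cast; ring
    rw [hcast, PySem.List.pyRange_one_cons (by omega), List.foldl_cons]
    cases hL : pvLetters s with
    | nil =>
      have hfind : s.find? (fun j => PySem.Chars.isalpha j) = none := by
        rw [pv_find_letters, hL]; rfl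
      have hstep : pvStepA s a = s := by rw [pvStepA, hfind]
      rw [hstep, ih (a+1) s (by omega) (by rw [hL]; simp), hL, pv_sub_nil, pv_sub_nil]
    | cons l0 L' =>
      have hfind : s.find? (fun j => PySem.Chars.isalpha j) = some l0 := by
        rw [pv_find_letters, hL]; rfl
      have hr : ∀ c ∈ PySem.Int.toChars a, PySem.Chars.isalpha c = false :=
        pv_toChars_not_alpha a ha
      have hstep : pvStepA s a
          = s.flatMap (fun c => if c = l0 then PySem.Int.toChars a else [c]) := by
        rw [pvStepA, hfind]
        exact pv_replace_single _ _ _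
      have hL' : pvLetters (s.flatMap (fun c => if c = l0 then PySem.Int.toChars a else [c])) = L' :=
        pv_letters_step s l0 L' _ hr hL
      have hlen' : (pvLetters (s.flatMap (fun c => if c = l0 then PySem.Int.toChars a else [c]))).length ≤ n := by
        rw [hL']
        have hl1 : (pvLetters s).length = L'.length + 1 := by rw [hL]; rfl
        omega
      rw [hstep, ih (a+1) _ (by omega) hlen', hL']
      have hnd : (l0 :: L').Nodup := hL ▸ pv_letters_nodup s
      exact pv_sub_step a l0 L' s (List.nodup_cons.mp hnd).1
        (fun c hc => pv_mem_letters_alpha (s := s) (by rw [hL]; exact List.mem_cons_of_mem _ hc)) hr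

-- ===== B side =====

lemma pv_ord_inj {x c : Char} (h : x.toNat = c.toNat) : x = c := by
  have h1 := Char.ofNat_toNat x
  rw [h, Char.ofNat_toNat] at h1
  exact h1.symm

lemma pv_contains_iff {κ ν : Type} [BEq κ] [LawfulBEq κ] (d : PySem.Dict κ ν) (k : κ) :
    d.contains k = true ↔ k ∈ d.items.map Prod.fst := by
  rw [PySem.Dict.contains]
  simp only [List.any_eq_true, List.mem_map, beq_iff_eq]

lemma pv_table_items : ∀ L : List Char, L.Nodup →
    (pvTable L).items
      = L.zipIdx.map (fun p => (((p.1.toNat : Nat) : Int), PySem.Int.toChars ((p.2 : Nat) : Int))) := by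
  intro L
  induction L using List.reverseRecOn with
  | nil => intro _; rfl
  | append_singleton t c ih =>
    intro hnd
    have hsplit := List.nodup_append.mp hnd
    have h1 : t.Nodup := hsplit.1
    have hnotin : c ∉ t := fun hmem => (hsplit.2.2 c hmem c (List.mem_singleton_self c)) rfl
    have hkeys : (pvTable t).items.map Prod.fst = t.map (fun x => ((x.toNat : Nat) : Int)) := by
      rw [ih h1, List.map_map]
      rw [show ((Prod.fst ∘ fun p : Char × Nat =>
          (((p.1.toNat : Nat) : Int), PySem.Int.toChars ((p.2 : Nat) : Int))))
        = ((fun x : Char => ((x.toNat : Nat) : Int)) ∘ Prod.fst) from rfl]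
      rw [← List.map_map, List.zipIdx_map_fst]
    have hcont : (pvTable t).contains ((c.toNat : Int)) = false := by
      rw [← Bool.not_eq_true, pv_contains_iff, hkeys]
      simp only [List.mem_map]
      rintro ⟨x, hx, heq⟩
      exact hnotin ((pv_ord_inj (by exact_mod_cast heq)) ▸ hx)
    rw [pvTable, PySem.List.enumerate_append, List.foldl_append, PySem.List.enumerate_cons,
      PySem.List.enumerate_nil, List.foldl_cons, List.foldl_nil, ← pvTable,
      PySem.Dict.insert, if_neg (by rw [hcont]; exact Bool.false_ne_true), ih h1]
    simp [List.zipIdx_append]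

lemma pv_find_lookup :
    ∀ (L : List Char) (k : Nat) (c : Char) (j : Nat), PySem.List.index? L c = some j →
    ((L.zipIdx k).map (fun p => (((p.1.toNat : Nat) : Int), PySem.Int.toChars ((p.2 : Nat) : Int)))).find?
        (fun p => p.1 == ((c.toNat : Nat) : Int))
      = some (((c.toNat : Nat) : Int), PySem.Int.toChars ((k + j : Nat) : Int)) := by
  intro L
  induction L with
  | nil =>
    intro k c j h
    rw [(PySem.List.index?_eq_none_iff _ _).mpr (by simp)] at h
    cases h
  | cons x t ih =>
    intro k c j h
    by_cases hx : x = c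
    · subst hx
      rw [PySem.List.index?_cons_self] at h
      injection h with h
      subst h
      simp
    · rw [PySem.List.index?_cons_of_ne _ hx] at h
      cases hidx : PySem.List.index? t c with
      | none => rw [hidx] at h; cases h
      | some j' =>
        rw [hidx] at h
        simp only [Option.map_some] at h
        injection h with h
        subst h
        simp only [List.zipIdx_cons, List.map_cons]
        rw [List.find?_cons_of_neg
          (by simp only [beq_iff_eq, Int.natCast_inj]; exact fun hh => hx (pv_ord_inj hh)),
          ih (k+1) c j' hidx, show k + 1 + j' = k + (j' + 1) from by omega]

lemma pv_normB (s : List Char) : pvNormB s = pvSub 0 (pvLetters s) s := by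
  have hlet : (PySem.List.dedup s).filter (fun c => PySem.Chars.isalpha c) = pvLetters s := by
    rw [pvLetters, PySem.List.dedup_eq_ofList, PySem.List.dedup_eq_ofList, pv_ofList_filter]
  simp only [pvNormB]
  rw [hlet, pvSub]
  apply pv_flatMap_congr
  intro c hc
  by_cases hca : PySem.Chars.isalpha c = true
  · have hm : c ∈ pvLetters s := by
      rw [pvLetters, PySem.List.mem_dedup, List.mem_filter]
      exact ⟨hc, hca⟩
    obtain ⟨j, hj⟩ := Option.isSome_iff_exists.mp ((PySem.List.index?_isSome_iff _ _).mpr hm)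
    have hget : (pvTable (pvLetters s)).get? ((c.toNat : Int))
        = some (PySem.Int.toChars ((0 + j : Nat) : Int)) := by
      simp only [PySem.Dict.get?]
      rw [pv_table_items _ (pv_letters_nodup s), pv_find_lookup (pvLetters s) 0 c j hj]
      rfl
    simp only [hj, hget]
    congr 1
  · have hm : c ∉ pvLetters s := fun h => hca (pv_mem_letters_alpha h)
    have hnone : (pvTable (pvLetters s)).get? ((c.toNat : Int)) = none := by
      simp only [PySem.Dict.get?]
      rw [pv_table_items _ (pv_letters_nodup s)]
      rw [List.find?_eq_none.mpr ?_]
      · rfl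
      · intro p hp
        obtain ⟨q, hq, rfl⟩ := List.mem_map.mp hp
        simp only [beq_iff_eq, Int.natCast_inj]
        intro hh
        exact hm ((pv_ord_inj hh) ▸ List.fst_mem_of_mem_zipIdx hq)
    simp only [hnone, (PySem.List.index?_eq_none_iff _ _).mpr hm]

-- ===== VERDICT (by name: the statement is the Claim_ definition above) =====
theorem same_letter_pattern_spec : Claim_equal_same_letter_pattern := by
  intro t1 t2 _
  unfold Spec_same_letter_pattern same_letter_pattern same_letter_pattern_alt
  by_cases h : (PySem.Set.ofList t1.toList).length ≠ (PySem.Set.ofList t2.toList).length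
  · rw [if_pos h, if_pos h]
  · rw [if_neg h, if_neg h]
    have e1 := pv_foldA ((PySem.Set.ofList t1.toList).length) 0 t1.toList le_rfl (pv_letters_le_set _)
    have e2 := pv_foldA ((PySem.Set.ofList t2.toList).length) 0 t2.toList le_rfl (pv_letters_le_set _)
    rw [zero_add] at e1 e2
    simp only [e1, e2, pv_normB]
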